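-- pv_equiv track=rewrite | github.com/rammendozaa/PIIPback | piip_ipn_api/piip/command/problem.py | getProblemCode
-- ===== SOURCE A (Python) =====
-- def getProblemCode(problem_url):
--     cnt = 0
--     problem_code = ""
--     for c in problem_url[::-1]:
--         if cnt == 2:
--             break
--         if c == '/':
--             cnt += 1
--         else:
--             problem_code += c
--     return problem_code[::-1]
-- ===== SOURCE B (Python) =====
-- # Closed-form rewrite: split the whole URL on '/' once and join the last two
-- # segments with an empty separator -- same value as A's reverse character scan.
-- def getProblemCode(problem_url):
--     parts = problem_url.split('/')
--     return ''.join(parts[-2:])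
-- ===== Notes on version B (the rewrite author's own statement) =====
-- stated objective: simpler
-- what changed: A scans the string in reverse character by character, counting slashes and breaking at the second; B splits the whole URL on the slash separator once and joins the last two segments with an empty separator.
import Mathlib
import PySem

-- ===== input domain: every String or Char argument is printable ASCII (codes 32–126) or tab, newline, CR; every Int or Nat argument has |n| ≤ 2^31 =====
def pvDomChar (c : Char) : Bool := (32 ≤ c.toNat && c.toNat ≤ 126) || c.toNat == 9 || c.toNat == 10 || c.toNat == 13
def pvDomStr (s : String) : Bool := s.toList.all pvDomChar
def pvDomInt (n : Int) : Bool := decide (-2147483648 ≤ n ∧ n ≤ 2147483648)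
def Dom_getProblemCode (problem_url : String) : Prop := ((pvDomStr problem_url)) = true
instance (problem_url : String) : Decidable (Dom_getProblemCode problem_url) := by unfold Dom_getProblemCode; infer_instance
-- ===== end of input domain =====

-- B replaces A's reverse character scan (count slashes, break at the second) by one
-- whole-string split on '/' and an empty-separator join of the last two segments (simpler; measured faster in a timing run).

-- ===== PORT A =====
-- the for-loop over problem_url[::-1] (s[::-1] is reversal, PySem.List.slice?_none_none_neg_one)
-- with state cnt / problem_code; the final problem_code[::-1] is the .reverse at the end
def loopA : List Char → Int → List Char → List Char
  | [], _, code => code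
  | c :: rest, cnt, code =>
    if cnt == 2 then code
    else if c == '/' then loopA rest (cnt + 1) code
    else loopA rest cnt (code ++ [c])

def getProblemCode (problem_url : String) : String :=
  String.ofList ((loopA problem_url.toList.reverse 0 []).reverse)

-- ===== PORT B =====
-- parts = problem_url.split('/')  →  PySem.Chars.splitOn (sep ≠ "");  parts[-2:]  →  slice;  ''.join  →  Chars.join []
def getProblemCode_alt (problem_url : String) : String :=
  let parts := PySem.Chars.splitOn problem_url.toList ['/']
  String.ofList (PySem.Chars.join [] (PySem.List.slice parts (some (-2)) none))

-- ===== PRECONDITION & SPEC =====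
def Spec_getProblemCode (problem_url : String) (out : String) : Prop := out = getProblemCode_alt problem_url
instance (problem_url : String) (out : String) : Decidable (Spec_getProblemCode problem_url out) := by unfold Spec_getProblemCode; infer_instance

-- ===== CLAIM (what is proved, stated in full; the proofs are below) =====
def Claim_equal_getProblemCode : Prop := ∀ (problem_url : String), Dom_getProblemCode problem_url → Spec_getProblemCode problem_url (getProblemCode problem_url)

-- ===== LEMMAS AND PROOFS =====

-- notation: pvP c = "c is a slash", pvQ c = "c is kept by the loop"
def pvP : Char → Bool := fun c => c == '/'
def pvQ : Char → Bool := fun c => !(c == '/')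

-- once cnt = 2 the loop only breaks
theorem loopA_two (l : List Char) (acc : List Char) : loopA l 2 acc = acc := by
  cases l <;> simp [loopA]

-- with one slash seen, the loop copies chars up to (and drops) the next slash
theorem loopA_one (l : List Char) (acc : List Char) :
    loopA l 1 acc = acc ++ l.takeWhile pvQ := by
  induction l generalizing acc with
  | nil => simp [loopA]
  | cons c rest ih =>
    by_cases h : c = '/'
    · subst h; simp [loopA, loopA_two, pvQ]
    · simp [loopA, h, ih, pvQ]

-- the full loop from cnt = 0
theorem loopA_zero (l : List Char) (acc : List Char) :
    loopA l 0 acc = acc ++ l.takeWhile pvQ ++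
      (if l.dropWhile pvQ = [] then [] else (l.dropWhile pvQ).tail.takeWhile pvQ) := by
  induction l generalizing acc with
  | nil => simp [loopA]
  | cons c rest ih =>
    by_cases h : c = '/'
    · subst h; simp [loopA, loopA_one, pvQ]
    · simp [loopA, h, ih, pvQ]

-- modLast f xs applies f to the last element (used to restate snoc-splitting)
def modLast (f : List Char → List Char) : List (List Char) → List (List Char)
  | [] => []
  | [x] => [f x]
  | x :: y :: xs => x :: modLast f (y :: xs)

theorem modLast_cons_of_ne_nil (f : List Char → List Char) (x : List Char)
    (xs : List (List Char)) (h : xs ≠ []) : modLast f (x :: xs) = x :: modLast f xs := by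
  cases xs with
  | nil => exact absurd rfl h
  | cons y ys => simp [modLast]

theorem modLast_append_singleton (f : List Char → List Char) (xs : List (List Char))
    (x : List Char) : modLast f (xs ++ [x]) = xs ++ [f x] := by
  induction xs with
  | nil => simp [modLast]
  | cons y ys ih =>
    rw [List.cons_append, modLast_cons_of_ne_nil f y (ys ++ [x]) (by simp), ih]
    simp

-- PySem's fuelled splitter agrees with List.splitOnP on the slash predicate
theorem go_spec (fuel : Nat) (l cur : List Char) (acc : List (List Char))
    (h : l.length ≤ fuel) :
    PySem.Chars.splitOn.go ['/'] fuel l cur acc =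
      acc.reverse ++ List.modifyHead (cur.reverse ++ ·) (List.splitOnP pvP l) := by
  induction fuel generalizing l cur acc with
  | zero =>
    have hl : l = [] := List.eq_nil_of_length_eq_zero (Nat.le_zero.mp h)
    subst hl; simp [PySem.Chars.splitOn.go, List.splitOnP_nil]
  | succ n ih =>
    cases l with
    | nil => simp [PySem.Chars.splitOn.go, List.splitOnP_nil]
    | cons c rest =>
      by_cases hc : c = '/'
      · subst hc
        have : PySem.Chars.splitOn.go ['/'] (n+1) ('/' :: rest) cur acc =
            PySem.Chars.splitOn.go ['/'] n rest [] (cur.reverse :: acc) := by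
          simp [PySem.Chars.splitOn.go, List.isPrefixOf]
        rw [this, ih rest [] (cur.reverse :: acc) (by simpa using Nat.lt_succ_iff.mp (by simpa using h))]
        obtain ⟨a, as, hsplit⟩ := List.exists_cons_of_ne_nil (List.splitOnP_ne_nil pvP rest)
        simp [List.splitOnP_cons, pvP, hsplit]
      · have : PySem.Chars.splitOn.go ['/'] (n+1) (c :: rest) cur acc =
            PySem.Chars.splitOn.go ['/'] n rest (c :: cur) acc := by
          simp [PySem.Chars.splitOn.go, List.isPrefixOf, Ne.symm hc]
        rw [this, ih rest (c :: cur) acc (by simpa using Nat.lt_succ_iff.mp (by simpa using h))]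
        obtain ⟨a, as, hsplit⟩ := List.exists_cons_of_ne_nil (List.splitOnP_ne_nil pvP rest)
        simp [List.splitOnP_cons, pvP, hc, hsplit]

theorem splitOn_eq (cs : List Char) :
    PySem.Chars.splitOn cs ['/'] = List.splitOnP pvP cs := by
  rw [PySem.Chars.splitOn, go_spec (cs.length + 1) cs [] [] (Nat.le_succ _)]
  obtain ⟨a, as, hsplit⟩ := List.exists_cons_of_ne_nil (List.splitOnP_ne_nil pvP cs)
  simp [hsplit]

-- splitting after appending one char
theorem splitOnP_snoc (m : List Char) (c : Char) :
    List.splitOnP pvP (m ++ [c]) =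
      if c = '/' then List.splitOnP pvP m ++ [[]]
      else modLast (· ++ [c]) (List.splitOnP pvP m) := by
  induction m with
  | nil =>
    by_cases hc : c = '/' <;> simp [List.splitOnP_cons, List.splitOnP_nil, pvP, hc, modLast]
  | cons d m' ih =>
    obtain ⟨a, as, hsplit⟩ := List.exists_cons_of_ne_nil (List.splitOnP_ne_nil pvP m')
    by_cases hc : c = '/'
    · subst hc
      by_cases hd : d = '/' <;>
        simp [List.cons_append, List.splitOnP_cons, pvP, hd, ih, hsplit]
    · by_cases hd : d = '/'
      · simp [List.cons_append, List.splitOnP_cons, pvP, hd, hc, ih,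
          modLast_cons_of_ne_nil _ _ _ (List.splitOnP_ne_nil pvP m')]
      · cases as with
        | nil => simp [List.cons_append, List.splitOnP_cons, pvP, hd, hc, ih, hsplit, modLast]
        | cons b bs => simp [List.cons_append, List.splitOnP_cons, pvP, hd, hc, ih, hsplit, modLast]

-- splitting the reversal = reversing the split, part by part
theorem splitOnP_reverse (l : List Char) :
    List.splitOnP pvP l.reverse = (List.splitOnP pvP l).reverse.map List.reverse := by
  induction l with
  | nil => simp [List.splitOnP_nil]
  | cons c l' ih =>
    obtain ⟨a, as, hsplit⟩ := List.exists_cons_of_ne_nil (List.splitOnP_ne_nil pvP l')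
    by_cases hc : c = '/'
    · simp [List.reverse_cons, splitOnP_snoc, hc, ih, List.splitOnP_cons, pvP]
    · rw [List.reverse_cons, splitOnP_snoc, if_neg hc, ih, hsplit]
      simp only [List.reverse_cons, List.map_append, List.map_cons, List.map_nil]
      rw [modLast_append_singleton]
      simp [List.splitOnP_cons, pvP, hc, hsplit]

theorem splitOnP_reverse' (l : List Char) :
    List.splitOnP pvP l = ((List.splitOnP pvP l.reverse).reverse).map List.reverse := by
  have h := splitOnP_reverse l.reverse
  rw [List.reverse_reverse] at h
  exact h

-- a char surviving dropWhile pvQ at the front is a slash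
theorem dropWhile_head_slash (l : List Char) (d : Char) (r : List Char)
    (h : l.dropWhile pvQ = d :: r) : d = '/' := by
  induction l with
  | nil => simp at h
  | cons c l' ih =>
    by_cases hq : pvQ c = true
    · rw [List.dropWhile_cons, if_pos hq] at h; exact ih h
    · rw [List.dropWhile_cons, if_neg hq] at h
      have : c = '/' := by simpa [pvQ] using hq
      cases h; exact this

theorem takeWhile_eq_self_of_dropWhile_nil (l : List Char) (h : l.dropWhile pvQ = []) :
    l.takeWhile pvQ = l := by
  have := List.takeWhile_append_dropWhile (p := pvQ) (l := l)
  rw [h, List.append_nil] at this; exact this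

-- no slash: the split is the whole string
theorem splitOnP_no (l : List Char) (h : l.dropWhile pvQ = []) :
    List.splitOnP pvP l = [l] := by
  induction l with
  | nil => simp [List.splitOnP_nil]
  | cons c l' ih =>
    by_cases hq : pvQ c = true
    · rw [List.dropWhile_cons, if_pos hq] at h
      have hc : ¬ c = '/' := by simpa [pvQ] using hq
      simp [List.splitOnP_cons, pvP, hc, ih h]
    · rw [List.dropWhile_cons, if_neg hq] at h; exact absurd h (by simp)

-- a slash present: split = first slash-free run :: split of the remainder
theorem splitOnP_yes (l : List Char) (r : List Char) (h : l.dropWhile pvQ = '/' :: r) :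
    List.splitOnP pvP l = l.takeWhile pvQ :: List.splitOnP pvP r := by
  induction l with
  | nil => simp at h
  | cons c l' ih =>
    by_cases hq : pvQ c = true
    · rw [List.dropWhile_cons, if_pos hq] at h
      have hc : ¬ c = '/' := by simpa [pvQ] using hq
      simp [List.splitOnP_cons, pvP, hc, hq, ih h]
    · rw [List.dropWhile_cons, if_neg hq] at h
      have hc : c = '/' := by simpa [pvQ] using hq
      cases h
      simp [List.splitOnP_cons, pvP, hq]

theorem splitOnP_head_cons (l : List Char) :
    ∃ T, List.splitOnP pvP l = l.takeWhile pvQ :: T := by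
  cases h : l.dropWhile pvQ with
  | nil =>
    exact ⟨[], by rw [splitOnP_no l h, takeWhile_eq_self_of_dropWhile_nil l h]⟩
  | cons d r =>
    have hd := dropWhile_head_slash l d r h
    subst hd
    exact ⟨List.splitOnP pvP r, splitOnP_yes l r h⟩

-- the whole equality at the level of the reversed character list
theorem key (rv : List Char) :
    (loopA rv 0 []).reverse =
      PySem.Chars.join [] (List.drop ((((List.splitOnP pvP rv).reverse).map List.reverse).length - 2)
        (((List.splitOnP pvP rv).reverse).map List.reverse)) := by
  rw [loopA_zero]
  cases h : rv.dropWhile pvQ with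
  | nil =>
    rw [splitOnP_no rv h]
    simp [takeWhile_eq_self_of_dropWhile_nil rv h, PySem.Chars.join, List.intercalate]
  | cons d r =>
    have hd := dropWhile_head_slash rv d r h
    subst hd
    rw [splitOnP_yes rv r h]
    obtain ⟨T, hT⟩ := splitOnP_head_cons r
    rw [hT]
    have hshape : (((rv.takeWhile pvQ :: r.takeWhile pvQ :: T).reverse).map List.reverse) =
        ((T.reverse).map List.reverse) ++ [(r.takeWhile pvQ).reverse, (rv.takeWhile pvQ).reverse] := by
      simp
    rw [hshape]
    have hlen : (((T.reverse).map List.reverse) ++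
        [(r.takeWhile pvQ).reverse, (rv.takeWhile pvQ).reverse]).length - 2 =
        ((T.reverse).map List.reverse).length := by simp
    rw [hlen, List.drop_left]
    simp [PySem.Chars.join, List.intercalate]

-- ===== VERDICT (by name: the statement is the Claim_ definition above) =====
theorem getProblemCode_spec : Claim_equal_getProblemCode := by
  intro s _
  unfold Spec_getProblemCode getProblemCode getProblemCode_alt
  apply congrArg
  rw [splitOn_eq, PySem.List.slice_from_neg_ofNat _ 2 (by omega), splitOnP_reverse' s.toList]
  exact key s.toList.reverse
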